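-- pv_equiv track=rewrite | github.com/gnailuy/code_forces | acw/poj_3046.py | solve
-- ===== SOURCE A (Python) =====
-- def solve(T, A, S, B, ants):
--     f = [0 for _ in range(B+1)]  # 滚动数组，组成大小为 i 的集合的组合数
--     for a in range(1, T+1):  # 循环考虑每一个 Family 的蚂蚁
--         c = ants[a]  # 蚂蚁个数
--         for j in range(B, 0, -1):  # 从后向前，考虑集合大小 j
--             for i in range(1, c+1):  # 考虑选取当前蚂蚁为 i 个时
--                 if j-i > 0 and f[j-i] > 0:
--                     f[j] += f[j-i]  # 集合大小 j 的组合数加上集合大小 j-i 的组合数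
--         for i in range(1, min(c+1, B+1)):  # 考虑只放本组蚂蚁，没有别的蚂蚁时
--             f[i] += 1
--
--     return sum(f[S:])
-- ===== SOURCE B (Python) =====
-- def solve(T, A, S, B, ants):
--     # Bounded-knapsack counting via prefix sums: each family is absorbed in
--     # O(B) instead of O(B*c), rebuilding the DP array functionally.
--     f = [0] * (B + 1)
--     for a in range(1, T + 1):
--         c = ants[a]
--         if c <= 0:
--             continue
--         pre = []
--         run = 0
--         for v in f:
--             run += v
--             pre.append(run)
--         f = [0] + [f[j] + pre[j - 1] - (pre[j - c - 1] if j > c else 0)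
--                    + (1 if j <= c else 0)
--                    for j in range(1, B + 1)]
--     return sum(f[S:])
-- ===== Notes on version B (the rewrite author's own statement) =====
-- stated objective: faster
-- what changed: Replaces the O(B*c) per-family inner double loop (in-place descending knapsack with a positivity guard) by an O(B) prefix-sum sliding-window step that rebuilds the DP array functionally each family.
import Mathlib
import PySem

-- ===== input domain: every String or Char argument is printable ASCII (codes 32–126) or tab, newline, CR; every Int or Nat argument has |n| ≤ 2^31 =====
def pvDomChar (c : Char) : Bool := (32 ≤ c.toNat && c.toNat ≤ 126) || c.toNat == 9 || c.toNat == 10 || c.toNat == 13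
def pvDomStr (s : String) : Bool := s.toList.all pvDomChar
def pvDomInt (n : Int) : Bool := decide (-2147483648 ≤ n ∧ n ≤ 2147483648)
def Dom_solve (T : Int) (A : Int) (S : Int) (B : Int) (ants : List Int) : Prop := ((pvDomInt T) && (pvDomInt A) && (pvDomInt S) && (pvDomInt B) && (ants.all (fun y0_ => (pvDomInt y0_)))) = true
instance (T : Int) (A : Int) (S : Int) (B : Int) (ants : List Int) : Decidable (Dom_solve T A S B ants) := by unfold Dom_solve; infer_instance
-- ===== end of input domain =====

-- B replaces A's O(B*c) per-family guarded in-place inner double loop by an O(B)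
-- prefix-sum sliding-window step that rebuilds the DP array functionally (faster).

-- ===== PORT A =====
-- literal port of Source A: rolling array f, per family a guarded descending knapsack
-- then a +1 pass, finally sum(f[S:])
def solve (T : Int) (A : Int) (S : Int) (B : Int) (ants : List Int) : Int :=
  let f0 : List Int := (PySem.List.pyRange 0 (B+1) 1).map (fun _ => 0)
  let f := (PySem.List.pyRange 1 (T+1) 1).foldl (fun f a =>
    let c := PySem.List.pyGetD ants a 0
    let f := (PySem.List.pyRange B 0 (-1)).foldl (fun f j =>
      (PySem.List.pyRange 1 (c+1) 1).foldl (fun f i =>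
        if j - i > 0 ∧ 0 < PySem.List.pyGetD f (j-i) 0 then
          PySem.List.pySetD f j (PySem.List.pyGetD f j 0 + PySem.List.pyGetD f (j-i) 0)
        else f) f) f
    (PySem.List.pyRange 1 (min (c+1) (B+1)) 1).foldl (fun f i =>
      PySem.List.pySetD f i (PySem.List.pyGetD f i 0 + 1)) f) f0
  (PySem.List.slice f (some S) none).sum

-- ===== PORT B =====
-- literal port of Source B: per family (skipping c ≤ 0) build the running prefix sums
-- of f, then rebuild f as 0 :: [window formula for j in 1..B]; finally sum(f[S:])
def solve_alt (T : Int) (A : Int) (S : Int) (B : Int) (ants : List Int) : Int :=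
  let f := (PySem.List.pyRange 1 (T+1) 1).foldl (fun f a =>
    let c := PySem.List.pyGetD ants a 0
    if c ≤ 0 then f else
      let pre := (f.foldl (fun (st : Int × List Int) v => (st.1 + v, st.2 ++ [st.1 + v])) ((0 : Int), ([] : List Int))).2
      0 :: (PySem.List.pyRange 1 (B+1) 1).map (fun j =>
        PySem.List.pyGetD f j 0 + PySem.List.pyGetD pre (j-1) 0
          - (if j > c then PySem.List.pyGetD pre (j-c-1) 0 else 0)
          + (if j ≤ c then 1 else 0))) (List.replicate (B+1).toNat 0)
  (PySem.List.slice f (some S) none).sum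

-- ===== PRECONDITION & SPEC =====
-- Pre_ excludes exactly the inputs where A raises IndexError: ants[a] is read for
-- a = 1..T, so T ≥ 1 requires ants to have more than T elements.
def Pre_solve (T : Int) (A : Int) (S : Int) (B : Int) (ants : List Int) : Prop :=
  1 ≤ T → T < (ants.length : Int)
instance (T : Int) (A : Int) (S : Int) (B : Int) (ants : List Int) : Decidable (Pre_solve T A S B ants) := by unfold Pre_solve; infer_instance
def pvWitness_solve : Int × Int × Int × Int × List Int := (2, 0, 2, 3, [0, 1, 2])

def Spec_solve (T : Int) (A : Int) (S : Int) (B : Int) (ants : List Int) (out : Int) : Prop := out = solve_alt T A S B ants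
instance (T : Int) (A : Int) (S : Int) (B : Int) (ants : List Int) (out : Int) : Decidable (Spec_solve T A S B ants out) := by unfold Spec_solve; infer_instance

-- ===== CLAIM (what is proved, stated in full; the proofs are below) =====
def Claim_equal_solve : Prop := ∀ (T : Int) (A : Int) (S : Int) (B : Int) (ants : List Int), Dom_solve T A S B ants → Pre_solve T A S B ants → Spec_solve T A S B ants (solve T A S B ants)

-- ===== LEMMAS AND PROOFS =====

-- prefix sum of the first k.toNat entries
def tk (l : List Int) (k : Int) : Int := (l.take k.toNat).sum

-- guarded inner-loop sum of A: terms i = 1..n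
def sG (l : List Int) (j : Int) : Nat → Int
  | 0 => 0
  | n+1 => sG l j n +
      (if j - ((n : Int)+1) > 0 ∧ 0 < PySem.List.pyGetD l (j-((n : Int)+1)) 0
       then PySem.List.pyGetD l (j-((n : Int)+1)) 0 else 0)

-- unguarded version
def sU (l : List Int) (j : Int) : Nat → Int
  | 0 => 0
  | n+1 => sU l j n +
      (if j - ((n : Int)+1) > 0 then PySem.List.pyGetD l (j-((n : Int)+1)) 0 else 0)

lemma sG_succ (l : List Int) (j : Int) (n : Nat) :
    sG l j (n+1) = sG l j n +
      (if j - ((n : Int)+1) > 0 ∧ 0 < PySem.List.pyGetD l (j-((n : Int)+1)) 0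
       then PySem.List.pyGetD l (j-((n : Int)+1)) 0 else 0) := rfl

lemma sG_nonneg (l : List Int) (j : Int) (n : Nat) : 0 ≤ sG l j n := by
  induction n with
  | zero => simp [sG]
  | succ n ih => unfold sG; split_ifs with h <;> [exact add_nonneg ih (le_of_lt h.2); simpa using ih]

lemma sG_congr (l1 l2 : List Int) (j : Int)
    (h : ∀ p : Int, 0 < p → p < j → PySem.List.pyGetD l1 p 0 = PySem.List.pyGetD l2 p 0)
    (n : Nat) : sG l1 j n = sG l2 j n := by
  induction n with
  | zero => rfl
  | succ n ih =>
    unfold sG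
    rw [ih]
    by_cases hp : j - ((n : Int)+1) > 0
    · rw [h _ hp (by omega)]
    · have hq : ¬ ((n : Int) + 1 < j) := by omega
      simp [hq]

lemma pyGetD_nonneg0 (l : List Int) (h : ∀ x ∈ l, 0 ≤ x) (m : Int) :
    0 ≤ PySem.List.pyGetD l m 0 := by
  by_cases hr : PySem.Raise.InRange l.length m
  · exact h _ (PySem.List.pyGetD_mem l 0 hr)
  · rw [PySem.List.pyGetD_of_none l m 0 ((PySem.List.pyGet?_eq_none_iff l m).mpr hr)]

lemma sG_eq_sU (l : List Int) (j : Int) (hnn : ∀ x ∈ l, 0 ≤ x)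
    (n : Nat) : sG l j n = sU l j n := by
  induction n with
  | zero => rfl
  | succ n ih =>
    unfold sG sU
    rw [ih]
    by_cases hp : j - ((n : Int)+1) > 0
    · by_cases hv : 0 < PySem.List.pyGetD l (j-((n : Int)+1)) 0
      · simp [hv]
      · have := pyGetD_nonneg0 l hnn (j-((n : Int)+1))
        have hz : PySem.List.pyGetD l (j-((n : Int)+1)) 0 = 0 := by omega
        simp [hz]
    · have hq : ¬ ((n : Int) + 1 < j) := by omega
      simp [hq]

lemma tk_nonpos (l : List Int) (k : Int) (hk : k ≤ 0) : tk l k = 0 := by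
  unfold tk
  rw [Int.toNat_of_nonpos hk]
  simp

lemma tk_succ (l : List Int) (k : Int) (h0 : 0 ≤ k) (hk : k < (l.length : Int)) :
    tk l (k+1) = tk l k + l[k.toNat]'(by omega) := by
  unfold tk
  have h1 : (k+1).toNat = k.toNat + 1 := by omega
  rw [h1, List.sum_take_succ l k.toNat (by omega)]

lemma sU_eq_tk (l : List Int) (j : Int) (hj : 0 < j) (hjlen : j ≤ (l.length : Int))
    (h0 : PySem.List.pyGetD l 0 0 = 0) (n : Nat) :
    sU l j n = tk l j - tk l (j - n) := by
  induction n with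
  | zero => simp [sU]
  | succ n ih =>
    unfold sU
    rw [ih]
    have key : tk l (j - n) = tk l (j - ((n : Int)+1)) +
        (if j - ((n : Int)+1) > 0 then PySem.List.pyGetD l (j-((n : Int)+1)) 0 else 0) := by
      by_cases hp : j - ((n : Int)+1) > 0
      · have h1 : j - (n : Int) = (j - ((n : Int)+1)) + 1 := by ring
        rw [h1, tk_succ l _ (by omega) (by omega)]
        have h2 : PySem.List.pyGetD l (j-((n : Int)+1)) 0 = l[(j-((n : Int)+1)).toNat]'(by omega) :=
          PySem.List.pyGetD_eq_getElem l 0 (by omega) (by omega)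
        rw [if_pos hp, h2]
      · by_cases he : j - ((n : Int)+1) = 0
        · have h1 : j - (n : Int) = 1 := by omega
          have hl : 0 < l.length := by omega
          have hl' : (0 : Int) < (l.length : Int) := by exact_mod_cast hl
          have h3 : PySem.List.pyGetD l 0 0 = l[0]'hl := PySem.List.pyGetD_eq_getElem l 0 le_rfl hl'
          have hz : l[0]'hl = 0 := by rw [← h3, h0]
          have htk1 : tk l 1 = 0 := by
            unfold tk
            have h4 : (1 : Int).toNat = 0 + 1 := rfl
            rw [h4, List.sum_take_succ l 0 hl]
            simp [hz]
          rw [h1, htk1, he, tk_nonpos l 0 le_rfl]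
          simp
        · rw [tk_nonpos l _ (by omega), tk_nonpos l _ (by omega)]
          have hq : ¬ ((n : Int) + 1 < j) := by omega
          simp [hq]
    push_cast
    rw [key]
    ring

-- prefix-sum builder of B
def prefAux (r : Int) : List Int → List Int
  | [] => []
  | v :: vs => (r+v) :: prefAux (r+v) vs

lemma pre_fold_spec (l : List Int) (r : Int) (acc : List Int) :
    (l.foldl (fun (st : Int × List Int) v => (st.1 + v, st.2 ++ [st.1 + v])) (r, acc)).2
      = acc ++ prefAux r l := by
  induction l generalizing r acc with
  | nil => simp [prefAux]
  | cons v vs ih => simp [prefAux, ih]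

lemma prefAux_length (r : Int) (l : List Int) : (prefAux r l).length = l.length := by
  induction l generalizing r with
  | nil => rfl
  | cons v vs ih => simp [prefAux, ih]

lemma prefAux_getElem (l : List Int) (r : Int) (k : Nat) (hk : k < l.length) :
    (prefAux r l)[k]'(by rw [prefAux_length]; exact hk) = r + (l.take (k+1)).sum := by
  induction l generalizing r k with
  | nil => simp at hk
  | cons v vs ih =>
    cases k with
    | zero => simp [prefAux]
    | succ k =>
      have h1 := ih (r+v) k (by simpa using hk)
      simp [prefAux, h1]
      ring

-- A's inner-loop body / loops as named functions (definitional synonyms for the port's lambdas)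
def stepI (j : Int) (f : List Int) (i : Int) : List Int :=
  if j - i > 0 ∧ 0 < PySem.List.pyGetD f (j-i) 0 then
    PySem.List.pySetD f j (PySem.List.pyGetD f j 0 + PySem.List.pyGetD f (j-i) 0)
  else f

def stepJ (n : Nat) (f : List Int) (j : Int) : List Int :=
  (PySem.List.pyRange 1 ((n : Int)+1) 1).foldl (stepI j) f

-- pyGetD after pySetD, Int indices
lemma getD_setD (r : List Int) (j m v : Int) (hj0 : 0 ≤ j) (hjl : j < (r.length : Int)) (hm : 0 ≤ m) :
    PySem.List.pyGetD (PySem.List.pySetD r j v) m 0 =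
      if m = j then v else PySem.List.pyGetD r m 0 := by
  have h1 : j = ((j.toNat : Nat) : Int) := by omega
  have h2 : m = ((m.toNat : Nat) : Int) := by omega
  rw [h1, h2, PySem.List.pyGetD_pySetD_natCast r j.toNat m.toNat v 0 (by omega)]
  by_cases h : m.toNat = j.toNat
  · rw [if_pos h, if_pos (by omega)]
  · rw [if_neg h, if_neg (by omega)]

-- the inner i-loop of A at fixed j, count n
lemma inner_char (n : Nat) (l : List Int) (j : Int) (hj : 0 < j) (hlen : j < (l.length : Int)) :
    (stepJ n l j).length = l.length ∧ ∀ m : Int, 0 ≤ m → PySem.List.pyGetD (stepJ n l j) m 0 =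
      if m = j then PySem.List.pyGetD l j 0 + sG l j n else PySem.List.pyGetD l m 0 := by
  induction n with
  | zero =>
    have h0 : stepJ 0 l j = l := by
      unfold stepJ
      rw [show (((0:Nat) : Int)+1) = 1 by norm_num, PySem.List.pyRange_one_eq_nil le_rfl]
      rfl
    rw [h0]
    refine ⟨rfl, fun m hm => ?_⟩
    by_cases h : m = j
    · subst h; simp [sG]
    · rw [if_neg h]
  | succ n ih =>
    obtain ⟨ihl, ihg⟩ := ih
    have hsplit : stepJ (n+1) l j = stepI j (stepJ n l j) ((n : Int)+1) := by
      unfold stepJ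
      rw [show (((n+1:Nat)) : Int)+1 = (((n : Int))+1)+1 by push_cast; ring,
        PySem.List.pyRange_one_succ_right (by omega), List.foldl_append]
      rfl
    rw [hsplit]
    by_cases hc : j - ((n : Int)+1) > 0
    · have hne : j - ((n : Int)+1) ≠ j := by omega
      have hvr : PySem.List.pyGetD (stepJ n l j) (j-((n : Int)+1)) 0
          = PySem.List.pyGetD l (j-((n : Int)+1)) 0 := by
        rw [ihg _ (by omega), if_neg hne]
      by_cases hv : 0 < PySem.List.pyGetD l (j-((n : Int)+1)) 0
      · have hstep : stepI j (stepJ n l j) ((n : Int)+1)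
            = PySem.List.pySetD (stepJ n l j) j
                (PySem.List.pyGetD l j 0 + sG l j n + PySem.List.pyGetD l (j-((n : Int)+1)) 0) := by
          unfold stepI
          rw [hvr, if_pos ⟨hc, hv⟩, ihg j (by omega), if_pos rfl]
        rw [hstep]
        constructor
        · rw [PySem.List.length_pySetD, ihl]
        · intro m hm
          rw [getD_setD _ _ _ _ (by omega) (by rw [ihl]; omega) hm]
          by_cases h : m = j
          · rw [if_pos h, if_pos h]
            rw [sG_succ, if_pos ⟨hc, hv⟩]
            ring
          · rw [if_neg h, if_neg h, ihg m hm, if_neg h]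
      · have hstep : stepI j (stepJ n l j) ((n : Int)+1) = stepJ n l j := by
          unfold stepI
          rw [hvr, if_neg (by tauto)]
        rw [hstep]
        refine ⟨ihl, fun m hm => ?_⟩
        rw [ihg m hm]
        by_cases h : m = j
        · rw [if_pos h, if_pos h]
          rw [sG_succ, if_neg (by tauto)]
          ring
        · rw [if_neg h, if_neg h]
    · have hstep : stepI j (stepJ n l j) ((n : Int)+1) = stepJ n l j := by
        unfold stepI
        rw [if_neg (by tauto)]
      rw [hstep]
      refine ⟨ihl, fun m hm => ?_⟩
      rw [ihg m hm]
      by_cases h : m = j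
      · rw [if_pos h, if_pos h]
        rw [sG_succ, if_neg (by tauto)]
        ring
      · rw [if_neg h, if_neg h]

-- the descending j-loop of A
lemma desc_char (n : Nat) (k : Nat) (l : List Int) (hk : k < l.length) :
    let r := (PySem.List.pyRange (k : Int) 0 (-1)).foldl (stepJ n) l
    r.length = l.length ∧ ∀ m : Int, 0 ≤ m → PySem.List.pyGetD r m 0 =
      if 0 < m ∧ m ≤ (k : Int) then PySem.List.pyGetD l m 0 + sG l m n
      else PySem.List.pyGetD l m 0 := by
  induction k generalizing l with
  | zero =>
    rw [show ((0:Nat) : Int) = 0 by norm_num, PySem.List.pyRange_neg_one_eq_nil le_rfl]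
    refine ⟨rfl, fun m hm => ?_⟩
    rw [if_neg (by omega), List.foldl_nil]
  | succ k ih =>
    have hsplit : PySem.List.pyRange ((k+1 : Nat) : Int) 0 (-1)
        = ((k : Int)+1) :: PySem.List.pyRange (k : Int) 0 (-1) := by
      rw [show (((k+1:Nat)) : Int) = (k : Int)+1 by push_cast; ring,
        PySem.List.pyRange_neg_one_cons (by omega)]
      norm_num
    rw [hsplit, List.foldl_cons]
    obtain ⟨il, ig⟩ := inner_char n l ((k : Int)+1) (by omega) (by exact_mod_cast hk)
    obtain ⟨dl, dg⟩ := ih (stepJ n l ((k : Int)+1)) (by omega)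
    refine ⟨by rw [dl, il], fun m hm => ?_⟩
    rw [dg m hm]
    by_cases h1 : 0 < m ∧ m ≤ (k : Int)
    · rw [if_pos h1, ig m hm, if_neg (by omega), if_pos (by omega)]
      have hcongr : sG (stepJ n l ((k : Int)+1)) m n = sG l m n := by
        refine sG_congr _ _ m (fun p hp0 hpm => ?_) n
        rw [ig p (by omega), if_neg (by omega)]
      rw [hcongr]
    · rw [if_neg h1]
      by_cases h2 : m = (k : Int)+1
      · rw [ig m hm, if_pos h2, if_pos (by omega)]
        rw [h2]
      · rw [ig m hm, if_neg h2, if_neg (by omega)]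

-- the +1 loop of A, upper bound written as n+1
lemma plus_char (n : Nat) (l : List Int) (hn : n < l.length) :
    let r := (PySem.List.pyRange 1 ((n : Int)+1) 1).foldl (fun f i =>
        PySem.List.pySetD f i (PySem.List.pyGetD f i 0 + 1)) l
    r.length = l.length ∧ ∀ m : Int, 0 ≤ m → PySem.List.pyGetD r m 0 =
      PySem.List.pyGetD l m 0 + (if 1 ≤ m ∧ m ≤ (n : Int) then 1 else 0) := by
  induction n with
  | zero =>
    rw [show (((0:Nat) : Int)+1) = 1 by norm_num, PySem.List.pyRange_one_eq_nil le_rfl]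
    refine ⟨rfl, fun m hm => ?_⟩
    rw [if_neg (by omega), List.foldl_nil, add_zero]
  | succ n ih =>
    obtain ⟨il, ig⟩ := ih (by omega)
    have hsplit : PySem.List.pyRange 1 (((n+1:Nat) : Int)+1) 1
        = PySem.List.pyRange 1 ((n : Int)+1) 1 ++ [(n : Int)+1] := by
      rw [show (((n+1:Nat)) : Int)+1 = ((n : Int)+1)+1 by push_cast; ring,
        PySem.List.pyRange_one_succ_right (by omega)]
    rw [hsplit, List.foldl_append, List.foldl_cons, List.foldl_nil]
    set r := (PySem.List.pyRange 1 ((n : Int)+1) 1).foldl (fun f i =>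
        PySem.List.pySetD f i (PySem.List.pyGetD f i 0 + 1)) l with hr
    constructor
    · rw [PySem.List.length_pySetD, il]
    · intro m hm
      rw [getD_setD _ _ _ _ (by omega) (by rw [il]; exact_mod_cast hn) hm]
      by_cases h : m = (n : Int)+1
      · rw [if_pos h, ig ((n : Int)+1) (by omega), if_neg (by omega), if_pos (by omega), h]
        ring
      · rw [if_neg h, ig m hm]
        by_cases h2 : 1 ≤ m ∧ m ≤ (n : Int)
        · rw [if_pos h2, if_pos (by omega)]
        · rw [if_neg h2, if_neg (by omega)]

-- invariant carried through the family loop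
def InvF (b : Nat) (l : List Int) : Prop :=
  l.length = b + 1 ∧ PySem.List.pyGetD l 0 0 = 0 ∧ ∀ x ∈ l, 0 ≤ x

-- A's per-family step and B's per-family step
def stepA (b : Nat) (f : List Int) (c : Int) : List Int :=
  (PySem.List.pyRange 1 (min (c+1) ((b : Int)+1)) 1).foldl (fun f i =>
    PySem.List.pySetD f i (PySem.List.pyGetD f i 0 + 1))
    ((PySem.List.pyRange (b : Int) 0 (-1)).foldl (fun f j =>
      (PySem.List.pyRange 1 (c+1) 1).foldl (stepI j) f) f)

def stepB (b : Nat) (f : List Int) (c : Int) : List Int :=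
  if c ≤ 0 then f else
    let pre := (f.foldl (fun (st : Int × List Int) v => (st.1 + v, st.2 ++ [st.1 + v])) ((0 : Int), ([] : List Int))).2
    0 :: (PySem.List.pyRange 1 ((b : Int)+1) 1).map (fun j =>
      PySem.List.pyGetD f j 0 + PySem.List.pyGetD pre (j-1) 0
        - (if j > c then PySem.List.pyGetD pre (j-c-1) 0 else 0)
        + (if j ≤ c then 1 else 0))

lemma foldl_self (L : List Int) (f : List Int) : L.foldl (fun acc _ => acc) f = f := by
  induction L generalizing f with
  | nil => rfl
  | cons x xs ih => exact ih f

-- one family step: A's step equals B's step and Inv is preserved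
lemma step_eq (b : Nat) (l : List Int) (hI : InvF b l) (c : Int) :
    stepA b l c = stepB b l c ∧ InvF b (stepB b l c) := by
  obtain ⟨hlen, h0, hnn⟩ := hI
  by_cases hc : c ≤ 0
  · have hA : stepA b l c = l := by
      unfold stepA
      have hbody0 : (fun (f : List Int) (j : Int) => (PySem.List.pyRange 1 (c+1) 1).foldl (stepI j) f)
          = fun f _ => f := by
        funext f j
        rw [PySem.List.pyRange_one_eq_nil (by omega)]
        rfl
      rw [hbody0, foldl_self, PySem.List.pyRange_one_eq_nil (by omega), List.foldl_nil]
    unfold stepB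
    rw [if_pos hc, hA]
    exact ⟨rfl, hlen, h0, hnn⟩
  · have hc1 : 1 ≤ c := by omega
    have hcn : c = (c.toNat : Int) := by omega
    set n := c.toNat with hndef
    -- characterise A's step
    have hbody : (fun (f : List Int) (j : Int) => (PySem.List.pyRange 1 (c+1) 1).foldl (stepI j) f)
        = stepJ n := by
      funext f j
      unfold stepJ
      rw [hcn]
    have hkb : b < l.length := by omega
    obtain ⟨dl, dg⟩ := desc_char n b l hkb
    set d := (PySem.List.pyRange (b : Int) 0 (-1)).foldl (stepJ n) l with hd
    have hmin : min (c+1) ((b : Int)+1) = ((min n b : Nat) : Int) + 1 := by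
      push_cast
      omega
    obtain ⟨pl, pg⟩ := plus_char (min n b) d (by rw [dl]; omega)
    have hAchar : (stepA b l c).length = l.length ∧ ∀ m : Int, 0 ≤ m →
        PySem.List.pyGetD (stepA b l c) m 0 =
          (if 0 < m ∧ m ≤ (b : Int) then PySem.List.pyGetD l m 0 + sG l m n
           else PySem.List.pyGetD l m 0)
          + (if 1 ≤ m ∧ m ≤ ((min n b : Nat) : Int) then 1 else 0) := by
      unfold stepA
      rw [hbody, hmin, ← hd]
      exact ⟨by rw [pl, dl], fun m hm => by rw [pg m hm, dg m hm]⟩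
    -- characterise B's prefix sums
    have hpre : (l.foldl (fun (st : Int × List Int) v => (st.1 + v, st.2 ++ [st.1 + v])) ((0 : Int), ([] : List Int))).2
        = prefAux 0 l := by
      rw [pre_fold_spec l 0 []]
      rfl
    have hprelen : (prefAux 0 l).length = l.length := prefAux_length 0 l
    have hpre_val : ∀ k : Nat, k < l.length →
        PySem.List.pyGetD (prefAux 0 l) (k : Int) 0 = tk l ((k : Int)+1) := by
      intro k hk
      rw [PySem.List.pyGetD_eq_getElem (prefAux 0 l) 0 (by omega) (by rw [hprelen]; exact_mod_cast hk)]
      have h1 : ((k : Int)).toNat = k := by omega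
      have h2 : ((k : Int)+1).toNat = k + 1 := by omega
      unfold tk
      rw [h2]
      have := prefAux_getElem l 0 k hk
      simp only [h1]
      rw [this, zero_add]
    -- value of B's window formula
    have hval : ∀ m : Int, 1 ≤ m → m ≤ (b : Int) →
        PySem.List.pyGetD l m 0 + PySem.List.pyGetD (prefAux 0 l) (m-1) 0
          - (if m > c then PySem.List.pyGetD (prefAux 0 l) (m-c-1) 0 else 0)
          + (if m ≤ c then 1 else 0)
        = PySem.List.pyGetD l m 0 + sG l m n
          + (if 1 ≤ m ∧ m ≤ ((min n b : Nat) : Int) then 1 else 0) := by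
      intro m h1 h2
      have hsg : sG l m n = tk l m - tk l (m - (n : Int)) := by
        rw [sG_eq_sU l m hnn n, sU_eq_tk l m (by omega) (by omega) h0 n]
      have hp1 : PySem.List.pyGetD (prefAux 0 l) (m-1) 0 = tk l m := by
        have he : m - 1 = (((m-1).toNat : Nat) : Int) := by omega
        rw [he, hpre_val (m-1).toNat (by omega)]
        congr 1
        omega
      have hind : (if m ≤ c then (1:Int) else 0)
          = (if 1 ≤ m ∧ m ≤ ((min n b : Nat) : Int) then 1 else 0) := by
        split_ifs with ha hb' hb' <;> first | rfl | (exfalso; push_cast at * <;> omega)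
      by_cases hmc : m > c
      · have hp2 : PySem.List.pyGetD (prefAux 0 l) (m-c-1) 0 = tk l (m - (n : Int)) := by
          have he : m - c - 1 = (((m-c-1).toNat : Nat) : Int) := by omega
          rw [he, hpre_val (m-c-1).toNat (by omega)]
          congr 1
          omega
        rw [if_pos hmc, hp1, hp2, hsg, hind]
        ring
      · have htz : tk l (m - (n : Int)) = 0 := tk_nonpos l _ (by omega)
        rw [if_neg hmc, hp1, hsg, htz, hind]
        ring
    -- B's step, unfolded
    have hBdef : stepB b l c = 0 :: (PySem.List.pyRange 1 ((b : Int)+1) 1).map (fun j =>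
        PySem.List.pyGetD l j 0 + PySem.List.pyGetD (prefAux 0 l) (j-1) 0
          - (if j > c then PySem.List.pyGetD (prefAux 0 l) (j-c-1) 0 else 0)
          + (if j ≤ c then 1 else 0)) := by
      unfold stepB
      rw [if_neg hc]
      simp only [hpre]
    have hBlen : (stepB b l c).length = b + 1 := by
      rw [hBdef]
      simp [PySem.List.length_pyRange_one]
    -- the two steps are equal
    have hmaplen : ((PySem.List.pyRange 1 ((b : Int)+1) 1).map (fun j =>
        PySem.List.pyGetD l j 0 + PySem.List.pyGetD (prefAux 0 l) (j-1) 0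
          - (if j > c then PySem.List.pyGetD (prefAux 0 l) (j-c-1) 0 else 0)
          + (if j ≤ c then 1 else 0))).length = b := by
      simp [PySem.List.length_pyRange_one]
    have heq : stepA b l c = stepB b l c := by
      rw [hBdef]
      apply List.ext_getElem
      · rw [hAchar.1, hlen]
        simp [hmaplen]
      · intro i hi1 hi2
        have hgetA : (stepA b l c)[i]'hi1 = PySem.List.pyGetD (stepA b l c) (i : Int) 0 := by
          rw [PySem.List.pyGetD_eq_getElem (stepA b l c) 0 (by omega) (by exact_mod_cast hi1)]
          congr 1
        rw [hgetA, hAchar.2 (i : Int) (by omega)]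
        cases i with
        | zero =>
          rw [if_neg (by omega), if_neg (by omega), List.getElem_cons_zero,
            show ((0:Nat) : Int) = 0 from rfl, h0]
          ring
        | succ i' =>
          have hib : i' + 1 ≤ b := by
            have := hi2
            simp only [List.length_cons, hmaplen] at this
            omega
          rw [List.getElem_cons_succ, List.getElem_map, PySem.List.getElem_pyRange_one,
            show (1 : Int) + (i' : Nat) = ((i'+1 : Nat) : Int) by push_cast; ring,
            hval ((i'+1 : Nat) : Int) (by exact_mod_cast Nat.one_le_iff_ne_zero.mpr (Nat.succ_ne_zero i')) (by exact_mod_cast hib),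
            if_pos (show (0:Int) < ((i'+1 : Nat) : Int) ∧ ((i'+1 : Nat) : Int) ≤ (b : Int) by omega)]
    refine ⟨heq, ?_⟩
    -- invariant for B's step
    refine ⟨hBlen, ?_, ?_⟩
    · rw [hBdef, PySem.List.pyGetD_zero_cons]
    · intro x hx
      rw [hBdef] at hx
      rcases List.mem_cons.mp hx with hx0 | hxm
      · omega
      · obtain ⟨j, hjmem, hjval⟩ := List.mem_map.mp hxm
        have hjr : 1 ≤ j ∧ j < (b : Int)+1 := (PySem.List.mem_pyRange_one).mp hjmem
        rw [← hjval, hval j hjr.1 (by omega)]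
        have := pyGetD_nonneg0 l hnn j
        have := sG_nonneg l j n
        split_ifs <;> omega

-- the family loop, both versions, from equal invariant-satisfying starts
lemma outer_eq (b : Nat) (ants : List Int) (L : List Int) (l : List Int) (hI : InvF b l) :
    L.foldl (fun f a => stepA b f (PySem.List.pyGetD ants a 0)) l
      = L.foldl (fun f a => stepB b f (PySem.List.pyGetD ants a 0)) l
    ∧ InvF b (L.foldl (fun f a => stepB b f (PySem.List.pyGetD ants a 0)) l) := by
  induction L generalizing l with
  | nil => exact ⟨rfl, hI⟩
  | cons x xs ih =>
    obtain ⟨hstep, hInv⟩ := step_eq b l hI (PySem.List.pyGetD ants x 0)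
    rw [List.foldl_cons, List.foldl_cons, hstep]
    exact ih (stepB b l (PySem.List.pyGetD ants x 0)) hInv

lemma foldl_simpleB (ants : List Int) (L : List Int) (f : List Int) (hf : ∀ x ∈ f, x = (0:Int)) :
    ∀ x ∈ L.foldl (fun (f : List Int) (a : Int) =>
        if PySem.List.pyGetD ants a 0 ≤ 0 then f else [(0:Int)]) f, x = 0 := by
  induction L generalizing f with
  | nil => simpa using hf
  | cons a L ih =>
    rw [List.foldl_cons]
    apply ih
    split_ifs with hc
    · exact hf
    · intro x hx
      simpa using hx

theorem solve_spec : Claim_equal_solve := by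
  intro T A S B ants _ hpre
  show solve T A S B ants = solve_alt T A S B ants
  by_cases hB : 0 ≤ B
  · obtain ⟨b, rfl⟩ : ∃ b : Nat, B = (b : Int) := ⟨B.toNat, by omega⟩
    have hinit : ((PySem.List.pyRange 0 ((b : Int)+1) 1).map (fun _ => (0:Int)))
        = List.replicate (((b : Int)+1)).toNat 0 := by
      rw [List.map_const', PySem.List.length_pyRange_one]
      norm_num
    have hIinit : InvF b (List.replicate (((b : Int)+1)).toNat 0) := by
      refine ⟨?_, ?_, ?_⟩
      · rw [List.length_replicate]
        omega
      · rw [show (((b : Int)+1)).toNat = b+1 by omega, List.replicate_succ]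
        exact PySem.List.pyGetD_zero_cons _ _ _
      · intro x hx
        rw [List.eq_of_mem_replicate hx]
    obtain ⟨hfold, _⟩ := outer_eq b ants (PySem.List.pyRange 1 (T+1) 1)
      (List.replicate (((b : Int)+1)).toNat 0) hIinit
    show (PySem.List.slice ((PySem.List.pyRange 1 (T+1) 1).foldl
        (fun f a => stepA b f (PySem.List.pyGetD ants a 0))
        ((PySem.List.pyRange 0 ((b : Int)+1) 1).map (fun _ => (0:Int)))) (some S) none).sum
      = (PySem.List.slice ((PySem.List.pyRange 1 (T+1) 1).foldl
        (fun f a => stepB b f (PySem.List.pyGetD ants a 0))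
        (List.replicate (((b : Int)+1)).toNat 0)) (some S) none).sum
    rw [hinit, hfold]
  · -- B < 0: both sides sum an all-zero (indeed empty / [0]) list
    simp only [solve, solve_alt]
    have hAbody : (fun (f : List Int) (a : Int) =>
        let c := PySem.List.pyGetD ants a 0
        let f := (PySem.List.pyRange B 0 (-1)).foldl (fun f j =>
          (PySem.List.pyRange 1 (c+1) 1).foldl (fun f i =>
            if j - i > 0 ∧ 0 < PySem.List.pyGetD f (j-i) 0 then
              PySem.List.pySetD f j (PySem.List.pyGetD f j 0 + PySem.List.pyGetD f (j-i) 0)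
            else f) f) f
        (PySem.List.pyRange 1 (min (c+1) (B+1)) 1).foldl (fun f i =>
          PySem.List.pySetD f i (PySem.List.pyGetD f i 0 + 1)) f)
        = fun (f : List Int) (_ : Int) => f := by
      funext f a
      show (PySem.List.pyRange 1 (min (PySem.List.pyGetD ants a 0 + 1) (B+1)) 1).foldl
          (fun f i => PySem.List.pySetD f i (PySem.List.pyGetD f i 0 + 1))
          ((PySem.List.pyRange B 0 (-1)).foldl _ f) = f
      rw [PySem.List.pyRange_neg_one_eq_nil (by omega), List.foldl_nil,
        PySem.List.pyRange_one_eq_nil (by omega), List.foldl_nil]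
    have hBbody : (fun (f : List Int) (a : Int) =>
        let c := PySem.List.pyGetD ants a 0
        if c ≤ 0 then f else
          let pre := (f.foldl (fun (st : Int × List Int) v => (st.1 + v, st.2 ++ [st.1 + v])) ((0 : Int), ([] : List Int))).2
          0 :: (PySem.List.pyRange 1 (B+1) 1).map (fun j =>
            PySem.List.pyGetD f j 0 + PySem.List.pyGetD pre (j-1) 0
              - (if j > c then PySem.List.pyGetD pre (j-c-1) 0 else 0)
              + (if j ≤ c then 1 else 0)))
        = fun (f : List Int) (a : Int) =>
            if PySem.List.pyGetD ants a 0 ≤ 0 then f else [(0:Int)] := by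
      funext f a
      show (if PySem.List.pyGetD ants a 0 ≤ 0 then f else
          0 :: (PySem.List.pyRange 1 (B+1) 1).map _) = _
      rw [PySem.List.pyRange_one_eq_nil (by omega), List.map_nil]
    rw [hAbody, hBbody, foldl_self]
    have hAlist : ((PySem.List.pyRange 0 (B+1) 1).map (fun _ => (0:Int))) = [] := by
      rw [PySem.List.pyRange_one_eq_nil (by omega), List.map_nil]
    rw [hAlist]
    have hz := foldl_simpleB ants (PySem.List.pyRange 1 (T+1) 1)
      (List.replicate ((B+1)).toNat 0) (fun x hx => List.eq_of_mem_replicate hx)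
    rw [List.sum_eq_zero (fun x hx => by
        have := PySem.List.mem_of_mem_slice _ _ _ hx
        simp at this),
      List.sum_eq_zero (fun x hx => hz x (PySem.List.mem_of_mem_slice _ _ _ hx))]
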